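-- pv_equiv track=rewrite | github.com/apoapostolov/Tales-of-the-Old-West-2e | scripts/fix_loose_lists.py | compact_loose_lists
-- ===== SOURCE A (Python) =====
-- def is_bullet(line: str) -> bool:
--     """Return True if line is a bullet item (- prefix)."""
--     return line.startswith("- ")
--
-- def is_continuation(line: str) -> bool:
--     """Return True if line is an indented continuation of a bullet."""
--     return line.startswith("  ") and not line.startswith("  -")
--
-- def is_bullet_or_continuation(line: str) -> bool:
--     return is_bullet(line) or is_continuation(line)
--
-- def compact_loose_lists(text: str) -> tuple[str, int]:
--     """Remove blank lines between consecutive bullet items.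
--
--     Returns (fixed_text, count_of_removed_blanks).
--     """
--     lines = text.split("\n")
--     result = []
--     removed = 0
--     i = 0
--     while i < len(lines):
--         # Check if current line is a bullet or continuation
--         if is_bullet_or_continuation(lines[i]):
--             # Look ahead: if next line is blank and the line after
--             # is another bullet or continuation, skip the blank
--             if (
--                 i + 2 < len(lines)
--                 and lines[i + 1].strip() == ""
--                 and is_bullet_or_continuation(lines[i + 2])
--             ):
--                 result.append(lines[i])
--                 # Skip the blank line
--                 i += 2
--                 removed += 1
--                 continue
--         result.append(lines[i])
--         i += 1
--     return "\n".join(result), removed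
-- ===== SOURCE B (Python) =====
-- def _item(line: str) -> bool:
--     return line.startswith("- ") or (line.startswith("  ") and not line.startswith("  -"))
--
-- def compact_loose_lists(text: str) -> tuple[str, int]:
--     """Remove blank lines between consecutive bullet items.
--
--     One forward pass deciding at each blank line from its original
--     neighbours (previous line an item and not itself removed, next line
--     an item), instead of A's item-anchored lookahead with index jumps.
--     """
--     lines = text.split("\n")
--     out = []
--     removed = 0
--     prev = None
--     prev_removed = False
--     for j, cur in enumerate(lines):
--         nxt = lines[j + 1] if j + 1 < len(lines) else None
--         if (not prev_removed and cur.strip() == ""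
--                 and prev is not None and _item(prev)
--                 and nxt is not None and _item(nxt)):
--             removed += 1
--             prev_removed = True
--         else:
--             out.append(cur)
--             prev_removed = False
--         prev = cur
--     return "\n".join(out), removed
-- ===== Notes on version B (the rewrite author's own statement) =====
-- stated objective: simpler
-- what changed: B replaces A's item-anchored forward lookahead with index jumps (i += 2 to skip the blank) by a single uniform pass that decides at each blank line from its original neighbours (previous line an item and not itself removed, next line an item).
import Mathlib
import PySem

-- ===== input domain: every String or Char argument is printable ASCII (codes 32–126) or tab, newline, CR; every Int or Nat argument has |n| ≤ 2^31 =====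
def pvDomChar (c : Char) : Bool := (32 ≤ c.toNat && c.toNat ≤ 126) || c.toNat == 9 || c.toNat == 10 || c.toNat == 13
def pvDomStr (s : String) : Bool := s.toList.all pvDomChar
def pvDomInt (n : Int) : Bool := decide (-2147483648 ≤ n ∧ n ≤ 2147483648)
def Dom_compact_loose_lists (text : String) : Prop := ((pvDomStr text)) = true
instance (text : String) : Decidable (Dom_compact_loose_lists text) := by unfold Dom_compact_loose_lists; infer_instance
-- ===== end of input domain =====

-- B: one forward pass deciding at each blank line from its original neighbours
-- (previous line an item and not itself removed, next line an item), instead of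
-- A's item-anchored lookahead with index jumps; objective: simpler decomposition.

-- ===== PORT A =====
def pvIsBullet (line : String) : Bool := PySem.Str.startswith line "- "
def pvIsContinuation (line : String) : Bool :=
  PySem.Str.startswith line "  " && !PySem.Str.startswith line "  -"
def pvIsBulletOrContinuation (line : String) : Bool :=
  pvIsBullet line || pvIsContinuation line

-- the while loop of A, recursing on the remaining suffix of `lines` (i advances by 1 or 2)
def pvLoopA : List String → List String × Int
  | [] => ([], 0)
  | l :: b :: c :: r' =>
    if pvIsBulletOrContinuation l && (PySem.Str.strip b == "" && pvIsBulletOrContinuation c) then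
      let (r, k) := pvLoopA (c :: r')
      (l :: r, k + 1)
    else
      let (r, k) := pvLoopA (b :: c :: r')
      (l :: r, k)
  | l :: rest =>
    let (r, k) := pvLoopA rest
    (l :: r, k)

def compact_loose_lists (text : String) : String × Int :=
  let lines := (PySem.Str.split? text "\n").getD []
  let (result, removed) := pvLoopA lines
  (PySem.Str.join "\n" result, removed)

-- ===== PORT B =====
def pvItem (line : String) : Bool :=
  PySem.Str.startswith line "- " ||
    (PySem.Str.startswith line "  " && !PySem.Str.startswith line "  -")

-- the for loop of B: state (prev original line, whether prev was removed)
def pvLoopB (prev : Option String) (prevRemoved : Bool) : List String → List String × Int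
  | [] => ([], 0)
  | cur :: rest =>
    let nxt : Option String := rest.head?
    if !prevRemoved && PySem.Str.strip cur == ""
        && (match prev with | some p => pvItem p | none => false)
        && (match nxt with | some x => pvItem x | none => false) then
      let (r, k) := pvLoopB (some cur) true rest
      (r, k + 1)
    else
      let (r, k) := pvLoopB (some cur) false rest
      (cur :: r, k)

def compact_loose_lists_alt (text : String) : String × Int :=
  let lines := (PySem.Str.split? text "\n").getD []
  let (out, removed) := pvLoopB none false lines
  (PySem.Str.join "\n" out, removed)

-- ===== PRECONDITION & SPEC =====
def Spec_compact_loose_lists (text : String) (out : String × Int) : Prop := out = compact_loose_lists_alt text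
instance (text : String) (out : String × Int) : Decidable (Spec_compact_loose_lists text out) := by unfold Spec_compact_loose_lists; infer_instance

-- ===== CLAIM (what is proved, stated in full; the proofs are below) =====
def Claim_equal_compact_loose_lists : Prop := ∀ (text : String), Dom_compact_loose_lists text → Spec_compact_loose_lists text (compact_loose_lists text)

-- ===== LEMMAS AND PROOFS =====

theorem pvItem_eq (l : String) : pvItem l = pvIsBulletOrContinuation l := by
  simp [pvItem, pvIsBulletOrContinuation, pvIsBullet, pvIsContinuation]

-- "B will not remove the head of ls when prevRemoved = false and prev is `prev`"
def pvHeadSafe (prev : Option String) : List String → Prop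
  | b :: c :: _ =>
      ¬(PySem.Str.strip b == ""
        ∧ (match prev with | some p => pvItem p | none => False)
        ∧ pvItem c = true)
  | _ => True

-- one-step unfolding lemmas for the two loops
theorem pvLoopA_cons3 (l b c : String) (r' : List String) :
    pvLoopA (l :: b :: c :: r') =
      if pvIsBulletOrContinuation l && (PySem.Str.strip b == "" && pvIsBulletOrContinuation c) then
        (l :: (pvLoopA (c :: r')).1, (pvLoopA (c :: r')).2 + 1)
      else
        (l :: (pvLoopA (b :: c :: r')).1, (pvLoopA (b :: c :: r')).2) := by
  rw [pvLoopA]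

theorem pvLoopA_one (l : String) : pvLoopA [l] = ([l], 0) := by
  simp [pvLoopA]

theorem pvLoopA_two (l b : String) : pvLoopA [l, b] = ([l, b], 0) := by
  simp [pvLoopA]

theorem pvLoopB_step (prev : Option String) (pr : Bool) (cur : String) (rest : List String) :
    pvLoopB prev pr (cur :: rest) =
      if !pr && PySem.Str.strip cur == ""
          && (match prev with | some p => pvItem p | none => false)
          && (match rest.head? with | some x => pvItem x | none => false) then
        ((pvLoopB (some cur) true rest).1, (pvLoopB (some cur) true rest).2 + 1)
      else
        (cur :: (pvLoopB (some cur) false rest).1, (pvLoopB (some cur) false rest).2) := by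
  rfl

theorem pvLoop_key (n : Nat) : ∀ ls : List String, ls.length ≤ n →
    (∀ prev, pvHeadSafe prev ls → pvLoopB prev false ls = pvLoopA ls) ∧
    (∀ p, pvLoopB p true ls = pvLoopA ls) := by
  induction n with
  | zero =>
    intro ls hls
    have : ls = [] := List.eq_nil_of_length_eq_zero (Nat.le_zero.mp hls)
    subst this
    exact ⟨fun _ _ => by simp [pvLoopA, pvLoopB], fun _ => by simp [pvLoopA, pvLoopB]⟩
  | succ n ih =>
    intro ls hls
    match ls with
    | [] =>
      exact ⟨fun _ _ => by simp [pvLoopA, pvLoopB], fun _ => by simp [pvLoopA, pvLoopB]⟩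
    | [cur] =>
      constructor
      · intro prev _
        rw [pvLoopB_step, if_neg (by cases prev <;> simp), pvLoopA_one]
        simp [pvLoopB]
      · intro p
        rw [pvLoopB_step, if_neg (by simp), pvLoopA_one]
        simp [pvLoopB]
    | [cur, b] =>
      have htail : ∀ cu : String, pvLoopB (some cu) false [b] = ([b], 0) := by
        intro cu
        rw [pvLoopB_step, if_neg (by simp)]
        simp [pvLoopB]
      constructor
      · intro prev hsafe
        cases prev with
        | none =>
          rw [pvLoopB_step, if_neg (by simp), htail, pvLoopA_two]
        | some p =>
          simp only [pvHeadSafe] at hsafe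
          rw [pvLoopB_step, if_neg ?_, htail, pvLoopA_two]
          intro h
          simp only [Bool.and_eq_true] at h
          exact hsafe ⟨by simpa using h.1.1.2, by simpa using h.1.2, by simpa [pvItem_eq] using h.2⟩
      · intro p
        rw [pvLoopB_step, if_neg (by simp), htail, pvLoopA_two]
    | cur :: b :: c :: r' =>
      have hb : (b :: c :: r').length ≤ n := by
        simpa using Nat.le_of_succ_le_succ (by simpa using hls)
      have hc : (c :: r').length ≤ n := le_trans (by simp) hb
      -- the common tail after the current line is appended: B in state (some cur, false)
      have key : ∀ cu : String, pvLoopA (cu :: b :: c :: r') =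
          (cu :: (pvLoopB (some cu) false (b :: c :: r')).1,
            (pvLoopB (some cu) false (b :: c :: r')).2) := by
        intro cu
        by_cases h1 : pvIsBulletOrContinuation cu = true
        · by_cases h2 : (PySem.Str.strip b == "") = true
          · by_cases h3 : pvIsBulletOrContinuation c = true
            · have hB := (ih (c :: r') hc).2 (some b)
              rw [pvLoopA_cons3, if_pos (by simp [h1, h2, h3]),
                pvLoopB_step, if_pos (by simp [h2, pvItem_eq, h1, h3]), hB]
            · have hA := (ih (b :: c :: r') hb).1 (some cu)
                (by simp [pvHeadSafe, pvItem_eq, h3])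
              rw [pvLoopA_cons3, if_neg (by simp [h3]), hA]
          · have hA := (ih (b :: c :: r') hb).1 (some cu)
              (by simp [pvHeadSafe]; intro h; exact absurd h (by simpa using h2))
            rw [pvLoopA_cons3, if_neg (by simp [h2]), hA]
        · have hA := (ih (b :: c :: r') hb).1 (some cu)
            (by simp only [pvHeadSafe, pvItem_eq]
                rintro ⟨-, hp, -⟩; exact absurd hp (by simpa using h1))
          rw [pvLoopA_cons3, if_neg (by simp [h1]), hA]
      constructor
      · intro prev hsafe
        rw [key cur, pvLoopB_step, if_neg ?_]
        cases prev with
        | none => simp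
        | some p =>
          simp only [pvHeadSafe] at hsafe
          intro h
          simp only [Bool.and_eq_true] at h
          exact hsafe ⟨by simpa using h.1.1.2, by simpa using h.1.2, by simpa [pvItem_eq] using h.2⟩
      · intro p
        rw [key cur, pvLoopB_step, if_neg (by simp)]

theorem pvLoopB_eq_pvLoopA (ls : List String) : pvLoopB none false ls = pvLoopA ls := by
  refine ((pvLoop_key ls.length ls le_rfl).1 none ?_)
  cases ls with
  | nil => trivial
  | cons b rest => cases rest with
    | nil => trivial
    | cons c r => simp [pvHeadSafe]

-- ===== VERDICT (by name: the statement is the Claim_ definition above) =====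
theorem compact_loose_lists_spec : Claim_equal_compact_loose_lists := by
  intro text _
  unfold Spec_compact_loose_lists compact_loose_lists compact_loose_lists_alt
  simp only [pvLoopB_eq_pvLoopA]
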